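-- pv_equiv track=rewrite | github.com/UMC-MJU/4th_Algorithm_Study_A | 초은/8월2주차/프렌즈 4블록.py | deleteBlocks
-- ===== SOURCE A (Python) =====
-- def deleteBlocks(m, n, blocks, visited):
--
--     stack = []
--     for j in reversed(range(n)):
--         # 터트리지 않은 블럭들 스택에 저장
--         for i in reversed(range(m)):
--             if not visited[i][j]:
--                 stack.append(blocks[i][j])
--         # 아래부터 스택에 있는 값 채워주고 나머지는 -1로 초기화
--         for i in range(m):
--             if stack:
--                 if i < m - len(stack):
--                     blocks[i][j] = -1
--                 else:
--                     blocks[i][j] = stack.pop()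
--
--     return blocks
-- ===== SOURCE B (Python) =====
-- def deleteBlocks(m, n, blocks, visited):
--     # In-place two-pointer gravity compaction per column (mutates blocks, like the original).
--     for j in reversed(range(n)):
--         w = m - 1
--         for i in range(m - 1, -1, -1):
--             if not visited[i][j]:
--                 blocks[w][j] = blocks[i][j]
--                 w -= 1
--         if w < m - 1:
--             for i in range(w + 1):
--                 blocks[i][j] = -1
--     return blocks
-- ===== Notes on version B (the rewrite author's own statement) =====
-- stated objective: alternative
-- what changed: Replaces the auxiliary stack (append then pop to refill each column) with an in-place two-pointer compaction: a single downward scan copies unvisited blocks to a write cursor, then the rows above the cursor are filled with -1; no intermediate list is built.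
import Mathlib
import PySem

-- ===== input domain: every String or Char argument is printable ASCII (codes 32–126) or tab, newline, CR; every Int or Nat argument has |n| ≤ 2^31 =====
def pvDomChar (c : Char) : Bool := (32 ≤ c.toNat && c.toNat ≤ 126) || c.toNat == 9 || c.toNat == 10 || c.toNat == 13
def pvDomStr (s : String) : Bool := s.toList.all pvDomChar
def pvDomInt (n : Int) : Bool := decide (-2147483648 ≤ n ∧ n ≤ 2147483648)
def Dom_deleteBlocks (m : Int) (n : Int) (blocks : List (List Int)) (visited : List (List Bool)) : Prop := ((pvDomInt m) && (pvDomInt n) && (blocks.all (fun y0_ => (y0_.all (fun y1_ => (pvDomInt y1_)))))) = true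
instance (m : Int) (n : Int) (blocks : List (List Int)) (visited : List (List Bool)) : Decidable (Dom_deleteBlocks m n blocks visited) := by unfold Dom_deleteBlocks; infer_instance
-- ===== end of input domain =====

-- B replaces A's auxiliary stack (append, then pop to refill the column) with an in-place
-- two-pointer compaction per column; equivalence is about the RETURN value only (the Python
-- originals both mutate `blocks` in place).

-- shared index helpers: blocks[i][j] reads / writes (indices produced by range() are nonnegative here)
def pvGetI (bl : List (List Int)) (i j : Int) : Int :=
  PySem.List.pyGetD (PySem.List.pyGetD bl i []) j 0
def pvGetB (vs : List (List Bool)) (i j : Int) : Bool :=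
  PySem.List.pyGetD (PySem.List.pyGetD vs i []) j false
def pvSetI (bl : List (List Int)) (i j : Int) (v : Int) : List (List Int) :=
  PySem.List.pySetD bl i (PySem.List.pySetD (PySem.List.pyGetD bl i []) j v)

-- ===== PORT A =====
-- stack.append for unvisited blocks, scanning rows bottom-up
def pvStackPush (visited : List (List Bool)) (bl : List (List Int)) (j : Int) (s : List Int) (i : Int) : List Int :=
  if pvGetB visited i j = false then s ++ [pvGetI bl i j] else s

-- refill loop body: `if stack: if i < m - len(stack): blocks[i][j] = -1 else: blocks[i][j] = stack.pop()`
def pvRefill (m : Int) (j : Int) (p : List (List Int) × List Int) (i : Int) : List (List Int) × List Int :=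
  if p.2 = [] then p
  else if i < m - (p.2.length : Int) then (pvSetI p.1 i j (-1), p.2)
  else (pvSetI p.1 i j (p.2.getLastD 0), p.2.dropLast)

-- one column of A: build the stack, then refill the column from the bottom
def pvColA (m : Int) (visited : List (List Bool)) (acc : List (List Int) × List Int) (j : Int) : List (List Int) × List Int :=
  (PySem.List.pyRange 0 m 1).foldl (pvRefill m j)
    (acc.1, (PySem.List.pyRange 0 m 1).reverse.foldl (pvStackPush visited acc.1 j) acc.2)

def deleteBlocks (m : Int) (n : Int) (blocks : List (List Int)) (visited : List (List Bool)) : List (List Int) :=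
  ((PySem.List.pyRange 0 n 1).reverse.foldl (pvColA m visited) (blocks, ([] : List Int))).1

-- ===== PORT B =====
-- scan loop body: copy unvisited block down to the write cursor w (= q.2), then move the cursor up
def pvScan (visited : List (List Bool)) (j : Int) (q : List (List Int) × Int) (i : Int) : List (List Int) × Int :=
  if pvGetB visited i j = false then (pvSetI q.1 q.2 j (pvGetI q.1 i j), q.2 - 1) else q

-- one column of B: downward two-pointer compaction, then fill rows 0..w with -1 if the cursor moved
def pvColB (m : Int) (visited : List (List Bool)) (bl : List (List Int)) (j : Int) : List (List Int) :=
  let q := (PySem.List.pyRange (m - 1) (-1) (-1)).foldl (pvScan visited j) (bl, m - 1)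
  if q.2 < m - 1 then (PySem.List.pyRange 0 (q.2 + 1) 1).foldl (fun b i => pvSetI b i j (-1)) q.1
  else q.1

def deleteBlocks_alt (m : Int) (n : Int) (blocks : List (List Int)) (visited : List (List Bool)) : List (List Int) :=
  (PySem.List.pyRange 0 n 1).reverse.foldl (pvColB m visited) blocks

-- ===== PRECONDITION & SPEC =====
-- Pre_ excludes exactly the shapes on which the Python raises IndexError: when both m and n are
-- positive, blocks and visited must have at least m rows whose first m rows each have at least n entries.
def Pre_deleteBlocks (m : Int) (n : Int) (blocks : List (List Int)) (visited : List (List Bool)) : Prop :=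
  0 < m → 0 < n →
    (m.toNat ≤ blocks.length ∧ m.toNat ≤ visited.length ∧
      (∀ r ∈ blocks.take m.toNat, n.toNat ≤ r.length) ∧
      (∀ r ∈ visited.take m.toNat, n.toNat ≤ r.length))
instance (m : Int) (n : Int) (blocks : List (List Int)) (visited : List (List Bool)) : Decidable (Pre_deleteBlocks m n blocks visited) := by unfold Pre_deleteBlocks; infer_instance

def pvWitness_deleteBlocks : Int × Int × List (List Int) × List (List Bool) :=
  (2, 2, [[1, 2], [3, 4]], [[true, false], [false, true]])

def Spec_deleteBlocks (m : Int) (n : Int) (blocks : List (List Int)) (visited : List (List Bool)) (out : List (List Int)) : Prop := out = deleteBlocks_alt m n blocks visited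
instance (m : Int) (n : Int) (blocks : List (List Int)) (visited : List (List Bool)) (out : List (List Int)) : Decidable (Spec_deleteBlocks m n blocks visited out) := by unfold Spec_deleteBlocks; infer_instance

-- ===== CLAIM (what is proved, stated in full; the proofs are below) =====
def Claim_equal_deleteBlocks : Prop := ∀ (m : Int) (n : Int) (blocks : List (List Int)) (visited : List (List Bool)), Dom_deleteBlocks m n blocks visited → Pre_deleteBlocks m n blocks visited → Spec_deleteBlocks m n blocks visited (deleteBlocks m n blocks visited)

-- ===== LEMMAS AND PROOFS =====

-- the unvisited values of column j among rows 0..r-1, top to bottom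
def pvVals (bl : List (List Int)) (vis : List (List Bool)) (j : Int) : Nat → List Int
  | 0 => []
  | r + 1 => pvVals bl vis j r ++ (if pvGetB vis (r : Int) j then [] else [pvGetI bl (r : Int) j])

-- the (row, value) writes B's scan performs, in order, for rows r-1..0 with cursor starting at w
def pvDesc (bl : List (List Int)) (vis : List (List Bool)) (j : Int) : Nat → Int → List (Int × Int)
  | 0, _ => []
  | r + 1, w => if pvGetB vis (r : Int) j then pvDesc bl vis j r w
                else (w, pvGetI bl (r : Int) j) :: pvDesc bl vis j r (w - 1)

-- perform a list of (row, value) writes in column j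
def pvApply (j : Int) (bl : List (List Int)) (ps : List (Int × Int)) : List (List Int) :=
  ps.foldl (fun b p => pvSetI b p.1 j p.2) bl

lemma pvApply_append (j : Int) (bl : List (List Int)) (l1 l2 : List (Int × Int)) :
    pvApply j bl (l1 ++ l2) = pvApply j (pvApply j bl l1) l2 := by
  simp [pvApply, List.foldl_append]

lemma pvLen_vals (bl : List (List Int)) (vis : List (List Bool)) (j : Int) (r : Nat) :
    (pvVals bl vis j r).length ≤ r := by
  induction r with
  | zero => simp [pvVals]
  | succ r ih =>
    simp only [pvVals, List.length_append]
    split <;> simp <;> omega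

lemma pvGetI_setI_ne (b : List (List Int)) (i i' j j' : Int) (v : Int)
    (h1 : 0 ≤ i) (h2 : 0 ≤ i') (hne : i ≠ i') : pvGetI (pvSetI b i j v) i' j' = pvGetI b i' j' := by
  have hne' : i.toNat ≠ i'.toNat := by omega
  unfold pvGetI pvSetI
  rw [PySem.List.pySetD_of_nonneg _ _ h1]
  rw [PySem.List.pyGetD_of_nonneg _ _ h2, PySem.List.pyGetD_of_nonneg b _ h2]
  rw [List.getD_eq_getElem?_getD, List.getD_eq_getElem?_getD, List.getElem?_set_ne hne']

lemma pvSetI_comm (b : List (List Int)) (i1 i2 j : Int) (v1 v2 : Int)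
    (h1 : 0 ≤ i1) (h2 : 0 ≤ i2) (hne : i1 ≠ i2) :
    pvSetI (pvSetI b i1 j v1) i2 j v2 = pvSetI (pvSetI b i2 j v2) i1 j v1 := by
  have hne' : i1.toNat ≠ i2.toNat := by omega
  unfold pvSetI
  simp only [PySem.List.pySetD_of_nonneg _ _ h1, PySem.List.pySetD_of_nonneg _ _ h2,
    PySem.List.pyGetD_of_nonneg _ _ h1, PySem.List.pyGetD_of_nonneg _ _ h2,
    List.getD_eq_getElem?_getD, List.getElem?_set_ne hne', List.getElem?_set_ne (Ne.symm hne')]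
  rw [List.set_comm _ _ hne']

lemma pvApply_perm (j : Int) (l1 l2 : List (Int × Int)) (hp : l1.Perm l2) :
    ∀ bl, (l1.map Prod.fst).Nodup → (∀ p ∈ l1, 0 ≤ p.1) →
    pvApply j bl l1 = pvApply j bl l2 := by
  induction hp with
  | nil => intro bl _ _; rfl
  | cons x p ih =>
    intro bl hnd hnn
    simp only [pvApply, List.foldl_cons] at *
    exact ih _ (by simpa using (List.nodup_cons.mp (by simpa using hnd)).2)
      (fun q hq => hnn q (List.mem_cons_of_mem _ hq))
  | swap x y l =>
    intro bl hnd hnn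
    simp only [pvApply, List.foldl_cons]
    have hfst : y.1 ≠ x.1 := by
      simp only [List.map_cons, List.nodup_cons, List.mem_cons] at hnd
      exact fun h => hnd.1 (Or.inl h)
    rw [pvSetI_comm _ _ _ _ _ _ (hnn y (by simp)) (hnn x (by simp)) hfst]
  | trans p1 p2 ih1 ih2 =>
    intro bl hnd hnn
    rw [ih1 _ hnd hnn, ih2 _ ((p1.map Prod.fst).nodup_iff.mp hnd)
      (fun q hq => hnn q (p1.symm.subset hq))]

lemma pvFoldl_refill_nil (m j : Int) (l : List Int) (bl : List (List Int)) :
    l.foldl (pvRefill m j) (bl, []) = (bl, []) := by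
  induction l with
  | nil => rfl
  | cons x l ih => simpa [pvRefill] using ih

-- A's stack loop pushes exactly the unvisited column values, bottom-up
lemma pvStack_eq (vis : List (List Bool)) (bl : List (List Int)) (j : Int) (r : Nat) (s0 : List Int) :
    ((PySem.List.pyRange 0 (r : Int) 1).reverse).foldl (pvStackPush vis bl j) s0
      = s0 ++ (pvVals bl vis j r).reverse := by
  induction r generalizing s0 with
  | zero => simp [PySem.List.pyRange_one_eq_nil (by omega : (0:Int) ≤ 0), pvVals]
  | succ r ih =>
    have hc : ((r + 1 : Nat) : Int) = (r : Int) + 1 := by push_cast; ring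
    rw [hc, PySem.List.pyRange_one_succ_right (by positivity)]
    simp only [List.reverse_append, List.reverse_cons, List.reverse_nil, List.nil_append,
      List.singleton_append, List.foldl_cons]
    rw [ih]
    simp only [pvVals, pvStackPush, List.reverse_append]
    split <;> simp_all

-- refill phase 1: while i < m - len(stack) the loop writes -1 and keeps the stack
lemma pvRefill_phase1 (m j : Int) (s : List Int) (hs : s ≠ []) (l : List Int)
    (hl : ∀ x ∈ l, x < m - (s.length : Int)) (bl : List (List Int)) :
    l.foldl (pvRefill m j) (bl, s)
      = (l.foldl (fun b i => pvSetI b i j (-1)) bl, s) := by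
  induction l generalizing bl with
  | nil => rfl
  | cons x l ih =>
    simp only [List.foldl_cons]
    rw [show pvRefill m j (bl, s) x = (pvSetI bl x j (-1), s) by
      simp [pvRefill, hs, hl x (by simp)]]
    exact ih (fun y hy => hl y (by simp [hy])) _

-- refill phase 2: from row m - len(stack) on, every step pops
lemma pvRefill_phase2 (m j : Int) (s : List Int) (hs : s ≠ []) (bl : List (List Int)) :
    (PySem.List.pyRange (m - (s.length : Int)) m 1).foldl (pvRefill m j) (bl, s)
      = (pvApply j bl ((PySem.List.pyRange (m - (s.length : Int)) m 1).zip s.reverse), []) := by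
  induction s using List.reverseRecOn generalizing bl with
  | nil => exact absurd rfl hs
  | append_singleton s' v ih =>
    have hlen : ((s' ++ [v]).length : Int) = (s'.length : Int) + 1 := by simp
    have hlt : m - ((s' ++ [v]).length : Int) < m := by omega
    rw [PySem.List.pyRange_one_cons hlt]
    simp only [List.foldl_cons]
    have hstep : pvRefill m j (bl, s' ++ [v]) (m - ((s' ++ [v]).length : Int))
        = (pvSetI bl (m - ((s' ++ [v]).length : Int)) j v, s') := by
      simp [pvRefill]
    rw [hstep]
    have hnext : m - ((s' ++ [v]).length : Int) + 1 = m - (s'.length : Int) := by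
      rw [hlen]; ring
    rw [hnext]
    rcases eq_or_ne s' [] with rfl | hs'
    · simp only [List.nil_append, List.length_singleton, Nat.cast_one, List.length_nil,
        Nat.cast_zero, sub_zero]
      rw [PySem.List.pyRange_one_eq_nil (le_refl m), List.foldl_nil]
      simp [pvApply]
    · rw [ih hs']
      congr 1
      simp only [List.reverse_append, List.reverse_singleton, List.singleton_append,
        List.zip_cons_cons, pvApply, List.foldl_cons]

-- B's scan is a pure sequence of writes recorded by pvDesc, and moves the cursor by the number of unvisited rows
lemma pvScan_eq (vis : List (List Bool)) (bl : List (List Int)) (j : Int) :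
    ∀ (r : Nat) (w : Int) (bl' : List (List Int)), (r : Int) ≤ w + 1 →
    (∀ t : Nat, t < r → pvGetI bl' (t : Int) j = pvGetI bl (t : Int) j) →
    (PySem.List.pyRange ((r : Int) - 1) (-1) (-1)).foldl (pvScan vis j) (bl', w)
      = (pvApply j bl' (pvDesc bl vis j r w), w - ((pvVals bl vis j r).length : Int)) := by
  intro r
  induction r with
  | zero =>
    intro w bl' _ _
    simp [pvDesc, pvVals, pvApply]
  | succ r ih =>
    intro w bl' hw hagree
    have hc : ((r + 1 : Nat) : Int) - 1 = (r : Int) := by push_cast; ring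
    rw [hc, PySem.List.pyRange_neg_one_cons (by omega : (-1:Int) < (r:Int))]
    simp only [List.foldl_cons]
    by_cases hv : pvGetB vis (r : Int) j
    · rw [show pvScan vis j (bl', w) (r : Int) = (bl', w) by simp [pvScan, hv]]
      rw [ih w bl' (by push_cast at hw ⊢; omega) (fun t ht => hagree t (by omega))]
      simp [pvDesc, hv, pvVals]
    · have hw0 : (r : Int) ≤ w := by push_cast at hw; omega
      rw [show pvScan vis j (bl', w) (r : Int)
          = (pvSetI bl' w j (pvGetI bl (r : Int) j), w - 1) by
        simp [pvScan, hv, hagree r (by omega)]]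
      rw [ih (w - 1) _ (by omega) (fun t ht => by
        rw [pvGetI_setI_ne _ _ _ _ _ _ (by omega) (by positivity) (by omega)]
        exact hagree t (by omega))]
      simp only [pvDesc, pvVals, hv, List.length_append,
        pvApply, Prod.mk.injEq]
      refine ⟨rfl, by simp; ring⟩

-- the writes of B's scan are exactly A's refill writes, in reverse order
lemma pvDesc_eq (bl : List (List Int)) (vis : List (List Bool)) (j : Int) :
    ∀ (r : Nat) (w : Int),
    pvDesc bl vis j r w
      = ((PySem.List.pyRange (w - ((pvVals bl vis j r).length : Int) + 1) (w + 1) 1).zip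
          (pvVals bl vis j r)).reverse := by
  intro r
  induction r with
  | zero => intro w; simp [pvDesc, pvVals]
  | succ r ih =>
    intro w
    by_cases hv : pvGetB vis (r : Int) j
    · simp only [pvDesc, hv, if_pos, pvVals, List.append_nil]
      exact ih w
    · rw [show pvDesc bl vis j (r+1) w = (w, pvGetI bl (r:Int) j) :: pvDesc bl vis j r (w-1) from by
        simp [pvDesc, hv]]
      rw [show pvVals bl vis j (r+1) = pvVals bl vis j r ++ [pvGetI bl (r:Int) j] from by
        simp [pvVals, hv]]
      rw [ih (w - 1)]
      have hk := pvLen_vals bl vis j r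
      set k := (pvVals bl vis j r).length with hkdef
      rw [List.length_append, List.length_singleton]
      have h1 : w - ((k + 1 : Nat) : Int) + 1 = w - (k : Int) := by push_cast; ring
      rw [h1]
      rw [PySem.List.pyRange_one_succ_right (by omega : w - (k : Int) ≤ w)]
      rw [List.zip_append (by rw [PySem.List.length_pyRange_one]; omega)]
      rw [List.reverse_append]
      have h3 : w - 1 - (k : Int) + 1 = w - (k : Int) := by ring
      rw [h3]
      simp

-- per-column agreement: A's stack pass equals B's two-pointer pass
lemma pvColAB (m : Int) (vis : List (List Bool)) (j : Int) (bl : List (List Int)) :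
    pvColA m vis (bl, []) j = (pvColB m vis bl j, []) := by
  unfold pvColA pvColB
  rcases (by omega : m ≤ 0 ∨ 0 < m) with hm | hm
  · rw [PySem.List.pyRange_one_eq_nil hm,
      PySem.List.pyRange_neg_one_eq_nil (by omega : m - 1 ≤ -1)]
    simp
  · have hmc : (m.toNat : Int) = m := Int.toNat_of_nonneg (le_of_lt hm)
    set mN := m.toNat with hmN
    have hstack : (PySem.List.pyRange 0 m 1).reverse.foldl (pvStackPush vis bl j) ([] : List Int)
        = (pvVals bl vis j mN).reverse := by
      rw [← hmc]; simpa using pvStack_eq vis bl j mN []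
    set vals := pvVals bl vis j mN with hvals
    set k := vals.length with hkdef
    have hk : k ≤ mN := pvLen_vals bl vis j mN
    have hscan : (PySem.List.pyRange (m - 1) (-1) (-1)).foldl (pvScan vis j) (bl, m - 1)
        = (pvApply j bl (pvDesc bl vis j mN (m - 1)), (m - 1) - (k : Int)) := by
      have h := pvScan_eq vis bl j mN (m - 1) bl (by omega) (fun t _ => rfl)
      rwa [hmc] at h
    rcases Nat.eq_zero_or_pos k with hk0 | hkpos
    · have hnil : vals = [] := List.eq_nil_of_length_eq_zero hk0
      have hD : pvDesc bl vis j mN (m - 1) = [] := by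
        rw [pvDesc_eq, ← hvals, hnil]; simp
      simp only [hstack, hnil, List.reverse_nil, hscan, hD]
      rw [pvFoldl_refill_nil]
      simp [pvApply, hk0]
    · -- A side: split the refill loop at row m - k
      have hvne : vals ≠ [] := List.ne_nil_of_length_pos hkpos
      have hs : (vals.reverse : List Int) ≠ [] := by
        simpa [List.reverse_eq_nil_iff] using hvne
      have hsplit : PySem.List.pyRange 0 m 1
          = PySem.List.pyRange 0 (m - (k : Int)) 1 ++ PySem.List.pyRange (m - (k : Int)) m 1 :=
        PySem.List.pyRange_one_append 0 (m - (k : Int)) m (by omega) (by omega)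
      rw [hstack, hsplit, List.foldl_append]
      rw [pvRefill_phase1 m j vals.reverse hs _ (fun x hx => by
        rw [List.length_reverse]
        have := PySem.List.mem_pyRange_one.mp hx
        omega)]
      have hp2 := pvRefill_phase2 m j vals.reverse hs
        ((PySem.List.pyRange 0 (m - (k : Int)) 1).foldl (fun b i => pvSetI b i j (-1)) bl)
      rw [List.length_reverse, List.reverse_reverse] at hp2
      rw [hp2]
      have hD : pvDesc bl vis j mN (m - 1)
          = ((PySem.List.pyRange (m - (k : Int)) m 1).zip vals).reverse := by
        rw [pvDesc_eq, show m - 1 - ((pvVals bl vis j mN).length : Int) + 1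
            = m - ((pvVals bl vis j mN).length : Int) from by ring,
          show m - 1 + 1 = m from by ring]
      rw [hscan, hD]
      rw [if_pos (by omega : m - 1 - (k : Int) < m - 1)]
      rw [show m - 1 - (k : Int) + 1 = m - (k : Int) from by ring]
      have hF : ∀ b, (PySem.List.pyRange 0 (m - (k : Int)) 1).foldl (fun b i => pvSetI b i j (-1)) b
          = pvApply j b ((PySem.List.pyRange 0 (m - (k : Int)) 1).map (fun i => (i, (-1 : Int)))) := by
        intro b; rw [pvApply, List.foldl_map]
      rw [hF bl, hF (pvApply j bl ((PySem.List.pyRange (m - (k : Int)) m 1).zip vals).reverse)]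
      rw [← pvApply_append, ← pvApply_append]
      refine Prod.ext ?_ rfl
      refine pvApply_perm j _ _ ?_ bl ?_ ?_
      · exact (List.perm_append_comm).trans
          (((List.reverse_perm _).symm).append_right _)
      · rw [List.map_append]
        have h1 : ((PySem.List.pyRange 0 (m - (k : Int)) 1).map (fun i => (i, (-1 : Int)))).map Prod.fst
            = PySem.List.pyRange 0 (m - (k : Int)) 1 := by simp [List.map_map, Function.comp_def]
        have h2 : (((PySem.List.pyRange (m - (k : Int)) m 1).zip vals).map Prod.fst)
            = PySem.List.pyRange (m - (k : Int)) m 1 :=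
          List.map_fst_zip (by rw [PySem.List.length_pyRange_one]; omega)
        rw [h1, h2, List.nodup_append]
        refine ⟨PySem.List.nodup_pyRange_one _ _, PySem.List.nodup_pyRange_one _ _, ?_⟩
        intro a ha b hb
        have ha' := PySem.List.mem_pyRange_one.mp ha
        have hb' := PySem.List.mem_pyRange_one.mp hb
        omega
      · intro p hp
        rcases List.mem_append.mp hp with h | h
        · obtain ⟨i, hi, rfl⟩ := List.mem_map.mp h
          exact (PySem.List.mem_pyRange_one.mp hi).1
        · have h1 := (List.of_mem_zip h).1
          have h2 := PySem.List.mem_pyRange_one.mp h1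
          omega

lemma pvColsFold (m : Int) (vis : List (List Bool)) (cols : List Int) :
    ∀ bl : List (List Int), (cols.foldl (pvColA m vis) (bl, [])).1 = cols.foldl (pvColB m vis) bl := by
  induction cols with
  | nil => intro bl; rfl
  | cons c cs ih =>
    intro bl
    rw [List.foldl_cons, List.foldl_cons, pvColAB]
    exact ih _

-- ===== VERDICT (by name: the statement is the Claim_ definition above) =====
theorem deleteBlocks_spec : Claim_equal_deleteBlocks := by
  intro m n blocks visited _ _
  unfold Spec_deleteBlocks deleteBlocks deleteBlocks_alt
  exact pvColsFold m visited _ blocks
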